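-- pv_equiv track=rewrite | github.com/NoMoreZer0/lcc-aldar-kose | ml/src/consistory/consistory.py | _ensure_prompts
-- ===== SOURCE A (Python) =====
-- from typing import List, Optional, Sequence, Tuple, Union
--
-- def _ensure_prompts(prompts: Sequence[str], frames: Optional[int]) -> List[str]:
--     prompts = [p.strip() for p in prompts if p and p.strip()]
--     if not prompts:
--         raise ValueError("No prompts provided.")
--     if frames is None or frames <= 0:
--         return prompts
--     if len(prompts) >= frames:
--         return list(prompts[:frames])
--     # Repeat last prompt to reach desired frames
--     last = prompts[-1]
--     return list(prompts) + [last] * (frames - len(prompts))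
-- ===== SOURCE B (Python) =====
-- def _ensure_prompts(prompts, frames):
--     cleaned = [s for s in (p.strip() for p in prompts if p) if s]
--     if not cleaned:
--         raise ValueError("No prompts provided.")
--     if frames is None or frames <= 0:
--         return cleaned
--     # Single stateful scan: walk the cleaned prompts with an iterator that
--     # sticks at the last element once exhausted; no slicing, no replication.
--     it = iter(cleaned)
--     cur = None
--     out = []
--     for _ in range(frames):
--         cur = next(it, cur)
--         out.append(cur)
--     return out
-- ===== Notes on version B (the rewrite author's own statement) =====
-- stated objective: alternative
-- what changed: A's length comparison with slice-or-concat-replicate assembly is replaced by one stateful scan: an iterator over the cleaned prompts is advanced frames times with next(it, cur), so the output is built element by element and the iterator naturally sticks at the last prompt, with no length test, slicing or list multiplication; the cleaning is also restructured as a strip-then-filter generator pipeline.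
import Mathlib
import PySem

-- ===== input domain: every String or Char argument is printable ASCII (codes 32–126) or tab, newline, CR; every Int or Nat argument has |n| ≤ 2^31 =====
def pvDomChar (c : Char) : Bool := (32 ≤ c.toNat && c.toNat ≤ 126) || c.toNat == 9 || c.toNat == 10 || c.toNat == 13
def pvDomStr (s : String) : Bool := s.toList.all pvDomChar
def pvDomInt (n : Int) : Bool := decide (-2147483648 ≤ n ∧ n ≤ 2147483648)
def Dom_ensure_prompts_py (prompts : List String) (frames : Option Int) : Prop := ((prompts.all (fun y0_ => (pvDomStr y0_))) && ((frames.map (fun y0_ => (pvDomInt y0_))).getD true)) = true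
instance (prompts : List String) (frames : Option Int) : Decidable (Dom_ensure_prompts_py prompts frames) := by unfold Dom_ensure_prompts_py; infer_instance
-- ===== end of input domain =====

-- B replaces A's length-test + slice/concat-replicate assembly by one stateful scan
-- (an iterator advanced frames times, sticking at the last prompt); alternative decomposition, same cost.

-- ===== PORT A =====
def ensure_prompts_py (prompts : List String) (frames : Option Int) : List String :=
  let ps := (prompts.filter (fun p => !(p == "") && !(PySem.Str.strip p == ""))).map PySem.Str.strip
  if ps = [] then []  -- Python raises ValueError here; excluded by Pre_
  else match frames with
  | none => ps
  | some f =>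
    if f ≤ 0 then ps
    else if (ps.length : Int) ≥ f then PySem.List.slice ps none (some f)
    else
      let last := PySem.List.pyGetD ps (-1) ""
      ps ++ List.replicate (f - (ps.length : Int)).toNat last

-- ===== PORT B =====
-- the `for _ in range(frames): cur = next(it, cur); out.append(cur)` loop:
-- recursion over the fuel, consuming the iterator's remaining list, `cur` sticking when it runs out
def pvFitB : String → List String → Nat → List String
  | _, _, 0 => []
  | cur, [], Nat.succ k => cur :: pvFitB cur [] k
  | _, x :: xs, Nat.succ k => x :: pvFitB x xs k

def ensure_prompts_py_alt (prompts : List String) (frames : Option Int) : List String :=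
  let cleaned := ((prompts.filter (fun p => !(p == ""))).map PySem.Str.strip).filter (fun s => !(s == ""))
  if cleaned = [] then []  -- Python raises ValueError here; excluded by Pre_
  else match frames with
  | none => cleaned
  | some f =>
    if f ≤ 0 then cleaned
    else pvFitB "" cleaned f.toNat  -- "" plays cur's initial None; never emitted since cleaned ≠ []

-- ===== PRECONDITION & SPEC =====
-- Pre_ excludes exactly the inputs where A (and B) raise ValueError: no prompt survives the strip/filter.
def Pre_ensure_prompts_py (prompts : List String) (frames : Option Int) : Prop :=
  ∃ p ∈ prompts, p ≠ "" ∧ PySem.Str.strip p ≠ ""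
instance (prompts : List String) (frames : Option Int) : Decidable (Pre_ensure_prompts_py prompts frames) := by unfold Pre_ensure_prompts_py; infer_instance
def pvWitness_ensure_prompts_py : List String × Option Int := (["a cat", " ", "dog"], some 5)

def Spec_ensure_prompts_py (prompts : List String) (frames : Option Int) (out : List String) : Prop := out = ensure_prompts_py_alt prompts frames
instance (prompts : List String) (frames : Option Int) (out : List String) : Decidable (Spec_ensure_prompts_py prompts frames out) := by unfold Spec_ensure_prompts_py; infer_instance

-- ===== CLAIM (what is proved, stated in full; the proofs are below) =====
def Claim_equal_ensure_prompts_py : Prop := ∀ (prompts : List String) (frames : Option Int), Dom_ensure_prompts_py prompts frames → Pre_ensure_prompts_py prompts frames → Spec_ensure_prompts_py prompts frames (ensure_prompts_py prompts frames)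

-- ===== LEMMAS AND PROOFS =====

-- B's cleaning pipeline (keep nonempty, strip, keep nonempty) equals A's (filter both tests, then strip)
lemma clean_eq (l : List String) :
    ((l.filter (fun p => !(p == ""))).map PySem.Str.strip).filter (fun s => !(s == "")) =
    (l.filter (fun p => !(p == "") && !(PySem.Str.strip p == ""))).map PySem.Str.strip := by
  induction l with
  | nil => rfl
  | cons p l ih =>
    by_cases h1 : p = "" <;> by_cases h2 : PySem.Str.strip p = "" <;>
      simp [h1, h2, ih]

-- closed form of the stateful scan
lemma fit_eq (n : Nat) (cur : String) (ps : List String) :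
    pvFitB cur ps n = ps.take n ++ List.replicate (n - ps.length) (ps.getLastD cur) := by
  induction n generalizing cur ps with
  | zero => simp [pvFitB]
  | succ k ih =>
    cases ps with
    | nil => simp [pvFitB, ih, List.replicate_succ]
    | cons x xs =>
      have := ih x xs
      simp only [pvFitB, this, List.take_succ_cons, List.length_cons, List.getLastD_cons,
        Nat.succ_sub_succ, List.cons_append]

theorem ensure_prompts_py_spec : Claim_equal_ensure_prompts_py := by
  intro prompts frames _ hpre
  unfold Spec_ensure_prompts_py ensure_prompts_py ensure_prompts_py_alt
  rw [clean_eq]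
  set ps := (prompts.filter (fun p => !(p == "") && !(PySem.Str.strip p == ""))).map PySem.Str.strip with hps
  have hne : ps ≠ [] := by
    obtain ⟨p, hp, hp1, hp2⟩ := hpre
    have : p ∈ prompts.filter (fun p => !(p == "") && !(PySem.Str.strip p == "")) := by
      rw [List.mem_filter]; exact ⟨hp, by simp [hp1, hp2]⟩
    intro hnil
    rw [hps] at hnil
    rw [List.map_eq_nil_iff.mp hnil] at this
    exact absurd this List.not_mem_nil
  simp only [if_neg hne]
  cases frames with
  | none => rfl
  | some f =>
    by_cases hf : f ≤ 0
    · simp [hf]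
    · simp only [if_neg hf]
      replace hf : 0 < f := lt_of_not_ge hf
      have hL : 1 ≤ ps.length := List.length_pos_iff.mpr hne
      rw [fit_eq f.toNat "" ps]
      by_cases hge : (ps.length : Int) ≥ f
      · rw [if_pos hge]
        have : f.toNat - ps.length = 0 := by omega
        rw [this, List.replicate_zero, List.append_nil]
        exact PySem.List.slice_to ps (le_of_lt hf)
      · rw [if_neg hge]
        have htake : ps.take f.toNat = ps := List.take_of_length_le (by omega)
        rw [htake, PySem.List.pyGetD_neg_one ps "" hne]
        congr 1
        rw [List.getLastD_eq_getLast?, List.getLast?_eq_some_getLast hne]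
        congr 1
        omega
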